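/- GENERATED by c/gen_decode.py: decode facts of the image, one per distinct instruction byte string. -/
import UserX.DecodeImage

#decode_all Vorbis.Dec
  "01d0"  -- add eax,edx
  "0f82b3000000"  -- jb 10bb5a
  "0f84c5020000"  -- je 1149ba
  "0f85ec020000"  -- jne 1150b9
  "0f8e72060000"  -- jle 1158f8
  "0fb6451b"  -- movzx eax,BYTE PTR [rbp+0x1b]
  "29e8"  -- sub eax,ebp
  "4088abd3060000"  -- mov BYTE PTR [rbx+0x6d3],bpl
  "4129c7"  -- sub r15d,eax
  "4183ec08"  -- sub r12d,0x8
  "4189e8"  -- mov r8d,ebp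
  "41bd00000000"  -- mov r13d,0x0
  "4280bc23d4050000ff"  -- cmp BYTE PTR [rbx+r12*1+0x5d4],0xff
  "442ba380000000"  -- sub r12d,DWORD PTR [rbx+0x80]
  "44894be8"  -- mov DWORD PTR [rbx-0x18],r9d
  "4489bd24ffffff"  -- mov DWORD PTR [rbp-0xdc],r15d
  "448b742440"  -- mov r14d,DWORD PTR [rsp+0x40]
  "450fb6642402"  -- movzx r12d,BYTE PTR [r12+0x2]
  "4589c6"  -- mov r14d,r8d
  "46887c3301"  -- mov BYTE PTR [rbx+r14*1+0x1],r15b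
  "483b6b40"  -- cmp rbp,QWORD PTR [rbx+0x40]
  "4881c3a0000000"  -- add rbx,0xa0
  "4883ed20"  -- sub rbp,0x20
  "48898568ffffff"  -- mov QWORD PTR [rbp-0x98],rax
  "488b4c2420"  -- mov rcx,QWORD PTR [rsp+0x20]
  "488bb530080000"  -- mov rsi,QWORD PTR [rbp+0x830]
  "488d6858"  -- lea rbp,[rax+0x58]
  "488d7d50"  -- lea rdi,[rbp+0x50]
  "488dbba0000000"  -- lea rdi,[rbx+0xa0]
  "488dbdd4050000"  -- lea rdi,[rbp+0x5d4]
  "48c7442440a0811000"  -- mov QWORD PTR [rsp+0x40],0x1081a0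
  "490faffd"  -- imul rdi,r13
  "4989c7"  -- mov r15,rax
  "498d7c240d"  -- lea rdi,[r12+0xd]
  "498dbda0000000"  -- lea rdi,[r13+0xa0]
  "4a8d7c2301"  -- lea rdi,[rbx+r12*1+0x1]
  "4c037b28"  -- add r15,QWORD PTR [rbx+0x28]
  "4c897dc0"  -- mov QWORD PTR [rbp-0x40],r15
  "4c8b742470"  -- mov r14,QWORD PTR [rsp+0x70]
  "4c8da08c000000"  -- lea r12,[rax+0x8c]
  "4d89f0"  -- mov r8,r14
  "53"  -- push rbx
  "66410f6ecc"  -- movd xmm1,r12d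
  "66480f6ec2"  -- movq xmm0,rdx
  "7410"  -- je 11106f
  "74cd"  -- je 100d7a
  "7633"  -- jbe 1023bd
  "7d5b"  -- jge 1083a9
  "7f91"  -- jg 10e7fd
  "8344242401"  -- add DWORD PTR [rsp+0x24],0x1
  "84c0"  -- test al,al
  "895da8"  -- mov DWORD PTR [rbp-0x58],ebx
  "89d5"  -- mov ebp,edx
  "8b4c2478"  -- mov ecx,DWORD PTR [rsp+0x78]
  "8b856cffffff"  -- mov eax,DWORD PTR [rbp-0x94]
  "a802"  -- test al,0x2
  "c1e208"  -- shl edx,0x8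
  "c7801400c000f2f2f2f2"  -- mov DWORD PTR [rax+0xc00014],0xf2f2f2f2
  "d1f9"  -- sar ecx,1
  "e8083fffff"  -- call 100720
  "e811f7ffff"  -- call 101d00
  "e81bf4feff"  -- call 100800
  "e825cffeff"  -- call 100640
  "e82e6affff"  -- call 100480
  "e838f2feff"  -- call 100300
  "e843f4feff"  -- call 100300
  "e84df0feff"  -- call 100800
  "e85935ffff"  -- call 108f20
  "e867adffff"  -- call 100640
  "e871c2feff"  -- call 100640
  "e87ceeffff"  -- call 1003c0
  "e8882fffff"  -- call 100720
  "e89270ffff"  -- call 10d1c0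
  "e89becfeff"  -- call 100300
  "e8a6c8feff"  -- call 100300
  "e8b0e8feff"  -- call 103d00
  "e8baa8feff"  -- call 100560
  "e8c4edfeff"  -- call 100480
  "e8cdc2ffff"  -- call 100800
  "e8d944ffff"  -- call 108f20
  "e8e1faffff"  -- call 107500
  "e8ec0effff"  -- call 104100
  "e8f4effeff"  -- call 100300
  "e8ffeffeff"  -- call 100800
  "e942f0ffff"  -- jmp 113b22
  "e992f5ffff"  -- jmp 113b22
  "e9e6f2ffff"  -- jmp 113b22
  "eb58"  -- jmp 113337
  "ebd5"  -- jmp 10722c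
  "f20f2cfa"  -- cvttsd2si edi,xmm2
  "f20f5cd3"  -- subsd xmm2,xmm3
  "f30f104c240c"  -- movss xmm1,DWORD PTR [rsp+0xc]
  "f30f106dbc"  -- movss xmm5,DWORD PTR [rbp-0x44]
  "f30f114db0"  -- movss DWORD PTR [rbp-0x50],xmm1
  "f30f1173f4"  -- movss DWORD PTR [rbx-0xc],xmm6
  "f30f58c3"  -- addss xmm0,xmm3
  "f30f59cd"  -- mulss xmm1,xmm5
  "f30f5cfb"  -- subss xmm7,xmm3
  "f3410f117604"  -- movss DWORD PTR [r14+0x4],xmm6
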